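-- pv_equiv track=rewrite | github.com/weka511/bioinformatics | BA9H.py | MatchOnePatternUsingSuffixArray
-- ===== SOURCE A (Python) =====
-- def MatchOnePatternUsingSuffixArray(Text,Pattern,SuffixArray):
--     minIndex = 0
--     maxIndex = len(Text)
--     while minIndex < maxIndex:
--         midIndex = (minIndex + maxIndex)//2
--         if Pattern>Text[SuffixArray[midIndex]:]:
--             minIndex = midIndex + 1
--         else:
--             maxIndex = midIndex
--
--     first    = minIndex
--     maxIndex = len(Text)
--     while minIndex<maxIndex:
--         midIndex = (minIndex + maxIndex)//2
--         if Text[SuffixArray[midIndex]:].startswith(Pattern):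
--             minIndex = midIndex + 1
--         else:
--             maxIndex = midIndex
--
--     last = maxIndex
--     return (first,last)
-- ===== SOURCE B (Python) =====
-- def MatchOnePatternUsingSuffixArray(Text, Pattern, SuffixArray):
--     # Single left-to-right sweep instead of two binary searches:
--     # advance past every suffix smaller than Pattern (lower bound),
--     # then past every suffix that starts with Pattern.
--     n = len(Text)
--     first = 0
--     while first < n and Pattern > Text[SuffixArray[first]:]:
--         first += 1
--     last = first
--     while last < n and Text[SuffixArray[last]:].startswith(Pattern):
--         last += 1
--     return (first, last)
-- ===== Notes on version B (the rewrite author's own statement) =====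
-- stated objective: simpler
-- what changed: Replaced the two hand-rolled binary searches over the suffix array with one left-to-right linear sweep: advance past suffixes smaller than Pattern to get the lower bound, then past suffixes starting with Pattern to get the upper bound.
-- outside the precondition, e.g. on MatchOnePatternUsingSuffixArray('ba', 'a', [0, 1]): A returns (0, 2), B returns (0, 0)
import Mathlib
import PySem

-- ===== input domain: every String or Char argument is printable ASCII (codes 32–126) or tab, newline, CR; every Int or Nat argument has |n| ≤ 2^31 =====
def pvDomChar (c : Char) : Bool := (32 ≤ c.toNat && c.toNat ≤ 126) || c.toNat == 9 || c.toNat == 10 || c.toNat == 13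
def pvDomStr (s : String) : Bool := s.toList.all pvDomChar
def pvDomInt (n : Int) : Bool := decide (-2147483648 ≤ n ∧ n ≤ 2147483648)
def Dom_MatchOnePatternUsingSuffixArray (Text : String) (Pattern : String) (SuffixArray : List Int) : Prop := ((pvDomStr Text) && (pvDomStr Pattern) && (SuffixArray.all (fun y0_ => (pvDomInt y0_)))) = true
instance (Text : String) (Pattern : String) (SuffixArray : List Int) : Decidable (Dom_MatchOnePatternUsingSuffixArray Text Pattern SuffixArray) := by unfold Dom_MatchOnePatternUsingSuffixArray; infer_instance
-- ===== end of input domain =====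

-- B replaces A's two hand-rolled binary searches by one left-to-right linear sweep (simpler, not faster).
-- Equivalence is claimed on genuine suffix-array inputs (Pre_): SuffixArray at least as long as Text and
-- the referenced suffixes in nondecreasing order; Python string comparison is Lean's < on List Char (PySem).

-- termination helpers for the binary-search loops (cited by name in decreasing_by)
theorem pvDecA1 {lo hi m : Int} (h : lo < hi) (h1 : lo ≤ m) :
    (hi - (m + 1)).toNat < (hi - lo).toNat := by omega
theorem pvDecA2 {lo hi m : Int} (h : lo < hi) (h2 : m < hi) :
    (m - lo).toNat < (hi - lo).toNat := by omega
theorem pvMidLt {lo hi : Int} (h : lo < hi) : PySem.Int.floordiv (lo + hi) 2 < hi :=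
  (PySem.Int.floordiv_lt_iff_lt_mul (by omega)).mpr (by omega)

-- ===== PORT A =====
-- Text[SuffixArray[i]:] — index the list (none = IndexError), then slice the text (negative starts clamp, exactly Python)
def pvSfx? (t : List Char) (sa : List Int) (i : Int) : Option (List Char) :=
  (PySem.List.pyGet? sa i).map (fun k => PySem.List.slice t (some k) none)

-- first while-loop of A: 'go right' when Pattern > Text[SuffixArray[mid]:]; returns the final minIndex
def pvLoopA1 (t p : List Char) (sa : List Int) (minI maxI : Int) : Option Int :=
  if h : minI < maxI then
    match pvSfx? t sa (PySem.Int.floordiv (minI + maxI) 2) with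
    | none => none
    | some s =>
      if s < p then pvLoopA1 t p sa (PySem.Int.floordiv (minI + maxI) 2 + 1) maxI
      else pvLoopA1 t p sa minI (PySem.Int.floordiv (minI + maxI) 2)
  else some minI
termination_by (maxI - minI).toNat
decreasing_by
  · exact pvDecA1 h (PySem.Int.floordiv_two_mid_bounds (le_of_lt h)).1
  · exact pvDecA2 h (pvMidLt h)

-- second while-loop of A: 'go right' when the suffix startswith Pattern; returns the final maxIndex
def pvLoopA2 (t p : List Char) (sa : List Int) (minI maxI : Int) : Option Int :=
  if h : minI < maxI then
    match pvSfx? t sa (PySem.Int.floordiv (minI + maxI) 2) with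
    | none => none
    | some s =>
      if PySem.Chars.startswith s p then pvLoopA2 t p sa (PySem.Int.floordiv (minI + maxI) 2 + 1) maxI
      else pvLoopA2 t p sa minI (PySem.Int.floordiv (minI + maxI) 2)
  else some maxI
termination_by (maxI - minI).toNat
decreasing_by
  · exact pvDecA1 h (PySem.Int.floordiv_two_mid_bounds (le_of_lt h)).1
  · exact pvDecA2 h (pvMidLt h)

def MatchOnePatternUsingSuffixArray (Text : String) (Pattern : String) (SuffixArray : List Int) : List Int :=
  let t := Text.toList
  let p := Pattern.toList
  match pvLoopA1 t p SuffixArray 0 (t.length : Int) with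
  | none => []
  | some first =>
    match pvLoopA2 t p SuffixArray first (t.length : Int) with
    | none => []
    | some last => [first, last]

-- ===== PORT B =====
-- first sweep of B: while first < n and Pattern > Text[SuffixArray[first]:]: first += 1
def pvScanB1 (t p : List Char) (sa : List Int) (n i : Nat) : Option Nat :=
  if h : i < n then
    match pvSfx? t sa (i : Int) with
    | none => none
    | some s => if s < p then pvScanB1 t p sa n (i + 1) else some i
  else some i
termination_by n - i
decreasing_by exact Nat.sub_succ_lt_self n i h

-- second sweep of B: while last < n and Text[SuffixArray[last]:].startswith(Pattern): last += 1
def pvScanB2 (t p : List Char) (sa : List Int) (n i : Nat) : Option Nat :=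
  if h : i < n then
    match pvSfx? t sa (i : Int) with
    | none => none
    | some s => if PySem.Chars.startswith s p then pvScanB2 t p sa n (i + 1) else some i
  else some i
termination_by n - i
decreasing_by exact Nat.sub_succ_lt_self n i h

def MatchOnePatternUsingSuffixArray_alt (Text : String) (Pattern : String) (SuffixArray : List Int) : List Int :=
  let t := Text.toList
  let p := Pattern.toList
  match pvScanB1 t p SuffixArray t.length 0 with
  | none => []
  | some first =>
    match pvScanB2 t p SuffixArray t.length first with
    | none => []
    | some last => [(first : Int), (last : Int)]

-- ===== PRECONDITION & SPEC =====
-- the suffix Text[SuffixArray[i]:] for a position i known to be in range (used only by Pre_ and the proofs)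
def pvSuffix (t : List Char) (sa : List Int) (i : Nat) : List Char :=
  PySem.List.slice t (some (sa.getD i 0)) none

-- Pre_ restricts to genuine suffix-array inputs: SuffixArray at least as long as Text (else A's binary
-- search hits an IndexError on most inputs) and the suffixes it names in nondecreasing order — on an
-- unsorted array A's binary-search range is an accident of the probe order and B's sweep legitimately differs.
def Pre_MatchOnePatternUsingSuffixArray (Text : String) (Pattern : String) (SuffixArray : List Int) : Prop :=
  Text.toList.length ≤ SuffixArray.length ∧
  List.Pairwise (fun i j => pvSuffix Text.toList SuffixArray i ≤ pvSuffix Text.toList SuffixArray j)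
    (List.range Text.toList.length)
instance (Text : String) (Pattern : String) (SuffixArray : List Int) : Decidable (Pre_MatchOnePatternUsingSuffixArray Text Pattern SuffixArray) := by unfold Pre_MatchOnePatternUsingSuffixArray; infer_instance

def pvWitness_MatchOnePatternUsingSuffixArray : String × String × List Int := ("ab", "a", [0, 1])

def Spec_MatchOnePatternUsingSuffixArray (Text : String) (Pattern : String) (SuffixArray : List Int) (out : List Int) : Prop := out = MatchOnePatternUsingSuffixArray_alt Text Pattern SuffixArray
instance (Text : String) (Pattern : String) (SuffixArray : List Int) (out : List Int) : Decidable (Spec_MatchOnePatternUsingSuffixArray Text Pattern SuffixArray out) := by unfold Spec_MatchOnePatternUsingSuffixArray; infer_instance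

-- ===== CLAIM (what is proved, stated in full; the proofs are below) =====
def Claim_equal_MatchOnePatternUsingSuffixArray : Prop := ∀ (Text : String) (Pattern : String) (SuffixArray : List Int), Dom_MatchOnePatternUsingSuffixArray Text Pattern SuffixArray → Pre_MatchOnePatternUsingSuffixArray Text Pattern SuffixArray → Spec_MatchOnePatternUsingSuffixArray Text Pattern SuffixArray (MatchOnePatternUsingSuffixArray Text Pattern SuffixArray)

-- ===== LEMMAS AND PROOFS =====

lemma pvSfx?_eq (t : List Char) (sa : List Int) (i : Nat) (h : i < sa.length) :
    pvSfx? t sa (i : Int) = some (pvSuffix t sa i) := by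
  simp [pvSfx?, pvSuffix, PySem.List.pyGet?_natCast, List.getElem?_eq_getElem h,
    List.getD_eq_getElem?_getD]

lemma pvSorted_le (t : List Char) (sa : List Int)
    (hs : List.Pairwise (fun i j => pvSuffix t sa i ≤ pvSuffix t sa j) (List.range t.length))
    {i j : Nat} (hij : i ≤ j) (hj : j < t.length) :
    pvSuffix t sa i ≤ pvSuffix t sa j := by
  rcases Nat.eq_or_lt_of_le hij with rfl | hlt
  · exact le_refl _
  · have h := List.pairwise_iff_getElem.mp hs i j
      (by simp only [List.length_range]; omega) (by simp only [List.length_range]; exact hj) hlt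
    simpa using h

-- a string lexicographically between a pattern and a string extending that pattern extends it too
lemma pvPrefix_of_between (p : List Char) : ∀ (s t : List Char),
    p ≤ s → s ≤ t → p <+: t → p <+: s := by
  induction p with
  | nil => intro s t _ _ _; exact List.nil_prefix
  | cons c p' ih =>
    intro s t h1 h2 h3
    obtain ⟨r, rfl⟩ := h3
    cases s with
    | nil => exact absurd h1 (not_le.mpr (List.nil_lt_cons _ _))
    | cons a s' =>
      have h1' : ¬ (a < c ∨ a = c ∧ s' < p') := by
        simpa [List.cons_lt_cons_iff] using not_lt.mpr h1
      have h2' : ¬ (c < a ∨ c = a ∧ (p' ++ r) < s') := by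
        simpa [List.cons_lt_cons_iff] using not_lt.mpr h2
      push_neg at h1' h2'
      by_cases hac : a = c
      · subst hac
        exact List.cons_prefix_cons.mpr ⟨rfl, ih s' (p' ++ r) (h1'.2 rfl) (h2'.2 rfl) (List.prefix_append p' r)⟩
      · exact absurd (le_antisymm h2'.1 h1'.1) hac

theorem pvScanB1_spec (t p : List Char) (sa : List Int) (hlen : t.length ≤ sa.length)
    (i : Nat) (hi : i ≤ t.length) :
    ∃ f, pvScanB1 t p sa t.length i = some f ∧ i ≤ f ∧ f ≤ t.length ∧
      (∀ j, i ≤ j → j < f → pvSuffix t sa j < p) ∧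
      (f < t.length → ¬ pvSuffix t sa f < p) := by
  rw [pvScanB1]
  by_cases h : i < t.length
  · rw [dif_pos h, pvSfx?_eq t sa i (lt_of_lt_of_le h hlen)]
    by_cases hc : pvSuffix t sa i < p
    · simp only [if_pos hc]
      obtain ⟨f, hf, h1, h2, h3, h4⟩ := pvScanB1_spec t p sa hlen (i + 1) (by omega)
      refine ⟨f, hf, by omega, h2, ?_, h4⟩
      intro j hij hjf
      rcases Nat.eq_or_lt_of_le hij with rfl | hlt
      · exact hc
      · exact h3 j hlt hjf
    · simp only [if_neg hc]
      exact ⟨i, rfl, le_refl i, hi, fun j h1 h2 => absurd (lt_of_le_of_lt h1 h2) (lt_irrefl i), fun _ => hc⟩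
  · rw [dif_neg h]
    exact ⟨i, rfl, le_refl i, hi, fun j h1 h2 => absurd (lt_of_le_of_lt h1 h2) (lt_irrefl i), fun h' => absurd h' h⟩
termination_by t.length - i

theorem pvScanB2_spec (t p : List Char) (sa : List Int) (hlen : t.length ≤ sa.length)
    (i : Nat) (hi : i ≤ t.length) :
    ∃ f, pvScanB2 t p sa t.length i = some f ∧ i ≤ f ∧ f ≤ t.length ∧
      (∀ j, i ≤ j → j < f → PySem.Chars.startswith (pvSuffix t sa j) p = true) ∧
      (f < t.length → ¬ PySem.Chars.startswith (pvSuffix t sa f) p = true) := by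
  rw [pvScanB2]
  by_cases h : i < t.length
  · rw [dif_pos h, pvSfx?_eq t sa i (lt_of_lt_of_le h hlen)]
    by_cases hc : PySem.Chars.startswith (pvSuffix t sa i) p = true
    · simp only [if_pos hc]
      obtain ⟨f, hf, h1, h2, h3, h4⟩ := pvScanB2_spec t p sa hlen (i + 1) (by omega)
      refine ⟨f, hf, by omega, h2, ?_, h4⟩
      intro j hij hjf
      rcases Nat.eq_or_lt_of_le hij with rfl | hlt
      · exact hc
      · exact h3 j hlt hjf
    · simp only [if_neg hc]
      exact ⟨i, rfl, le_refl i, hi, fun j h1 h2 => absurd (lt_of_le_of_lt h1 h2) (lt_irrefl i), fun _ => hc⟩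
  · rw [dif_neg h]
    exact ⟨i, rfl, le_refl i, hi, fun j h1 h2 => absurd (lt_of_le_of_lt h1 h2) (lt_irrefl i), fun h' => absurd h' h⟩
termination_by t.length - i

theorem pvLoopA1_eq (t p : List Char) (sa : List Int) (hlen : t.length ≤ sa.length)
    (K : Nat) (lo hi : Int) (hlo : 0 ≤ lo) (hloK : lo ≤ (K : Int)) (hKhi : (K : Int) ≤ hi)
    (hhi : hi ≤ (t.length : Int))
    (hiff : ∀ j : Nat, lo ≤ (j : Int) → (j : Int) < hi → (pvSuffix t sa j < p ↔ j < K)) :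
    pvLoopA1 t p sa lo hi = some (K : Int) := by
  rw [pvLoopA1]
  by_cases h : lo < hi
  · rw [dif_pos h]
    have hmid : PySem.Int.floordiv (lo + hi) 2 = (lo + hi) / 2 :=
      PySem.Int.floordiv_eq_ediv_of_pos (by omega)
    have hb1 : lo ≤ PySem.Int.floordiv (lo + hi) 2 := by rw [hmid]; omega
    have hb2 : PySem.Int.floordiv (lo + hi) 2 < hi := by rw [hmid]; omega
    have hm0 : ((PySem.Int.floordiv (lo + hi) 2).toNat : Int) = PySem.Int.floordiv (lo + hi) 2 :=
      Int.toNat_of_nonneg (by omega)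
    have hmlt : (PySem.Int.floordiv (lo + hi) 2).toNat < t.length := by omega
    rw [← hm0, pvSfx?_eq t sa _ (lt_of_lt_of_le hmlt hlen)]
    by_cases hc : pvSuffix t sa (PySem.Int.floordiv (lo + hi) 2).toNat < p
    · have hmK : (PySem.Int.floordiv (lo + hi) 2).toNat < K :=
        (hiff _ (by omega) (by omega)).mp hc
      simp only [if_pos hc]
      exact pvLoopA1_eq t p sa hlen K _ hi (by omega) (by omega) hKhi hhi
        (fun j h1 h2 => hiff j (by omega) h2)
    · have hKm : K ≤ (PySem.Int.floordiv (lo + hi) 2).toNat := by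
        by_contra hx
        exact hc ((hiff _ (by omega) (by omega)).mpr (by omega))
      simp only [if_neg hc]
      exact pvLoopA1_eq t p sa hlen K lo _ hlo hloK (by omega) (by omega)
        (fun j h1 h2 => hiff j h1 (by omega))
  · rw [dif_neg h]
    have : (K : Int) = lo := by omega
    rw [this]
termination_by (hi - lo).toNat
decreasing_by all_goals omega

theorem pvLoopA2_eq (t p : List Char) (sa : List Int) (hlen : t.length ≤ sa.length)
    (K : Nat) (lo hi : Int) (hlo : 0 ≤ lo) (hloK : lo ≤ (K : Int)) (hKhi : (K : Int) ≤ hi)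
    (hhi : hi ≤ (t.length : Int))
    (hiff : ∀ j : Nat, lo ≤ (j : Int) → (j : Int) < hi →
      (PySem.Chars.startswith (pvSuffix t sa j) p = true ↔ j < K)) :
    pvLoopA2 t p sa lo hi = some (K : Int) := by
  rw [pvLoopA2]
  by_cases h : lo < hi
  · rw [dif_pos h]
    have hmid : PySem.Int.floordiv (lo + hi) 2 = (lo + hi) / 2 :=
      PySem.Int.floordiv_eq_ediv_of_pos (by omega)
    have hb1 : lo ≤ PySem.Int.floordiv (lo + hi) 2 := by rw [hmid]; omega
    have hb2 : PySem.Int.floordiv (lo + hi) 2 < hi := by rw [hmid]; omega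
    have hm0 : ((PySem.Int.floordiv (lo + hi) 2).toNat : Int) = PySem.Int.floordiv (lo + hi) 2 :=
      Int.toNat_of_nonneg (by omega)
    have hmlt : (PySem.Int.floordiv (lo + hi) 2).toNat < t.length := by omega
    rw [← hm0, pvSfx?_eq t sa _ (lt_of_lt_of_le hmlt hlen)]
    by_cases hc : PySem.Chars.startswith (pvSuffix t sa (PySem.Int.floordiv (lo + hi) 2).toNat) p = true
    · have hmK : (PySem.Int.floordiv (lo + hi) 2).toNat < K :=
        (hiff _ (by omega) (by omega)).mp hc
      simp only [if_pos hc]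
      exact pvLoopA2_eq t p sa hlen K _ hi (by omega) (by omega) hKhi hhi
        (fun j h1 h2 => hiff j (by omega) h2)
    · have hKm : K ≤ (PySem.Int.floordiv (lo + hi) 2).toNat := by
        by_contra hx
        exact hc ((hiff _ (by omega) (by omega)).mpr (by omega))
      simp only [if_neg hc]
      exact pvLoopA2_eq t p sa hlen K lo _ hlo hloK (by omega) (by omega)
        (fun j h1 h2 => hiff j h1 (by omega))
  · rw [dif_neg h]
    have : (K : Int) = hi := by omega
    rw [this]
termination_by (hi - lo).toNat
decreasing_by all_goals omega

-- ===== VERDICT (by name: the statement is the Claim_ definition above) =====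
theorem MatchOnePatternUsingSuffixArray_spec : Claim_equal_MatchOnePatternUsingSuffixArray := by
  intro Text Pattern sa _ hPre
  obtain ⟨hlen, hsorted⟩ := hPre
  set t := Text.toList with ht
  set p := Pattern.toList with hp
  obtain ⟨f, hf, h0f, hfn, hall1, hstop1⟩ := pvScanB1_spec t p sa hlen 0 (Nat.zero_le _)
  obtain ⟨l, hl, hfl, hln, hall2, hstop2⟩ := pvScanB2_spec t p sa hlen f hfn
  -- f is the global boundary of 'suffix < Pattern'
  have hiff1 : ∀ j : Nat, j < t.length → (pvSuffix t sa j < p ↔ j < f) := by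
    intro j hj
    constructor
    · intro hcj
      by_contra hx
      have hfn' : f < t.length := lt_of_le_of_lt (by omega) hj
      exact hstop1 hfn' (lt_of_le_of_lt (pvSorted_le t sa hsorted (by omega) hj) hcj)
    · intro hjf
      exact hall1 j (Nat.zero_le _) hjf
  -- l is the boundary of 'suffix startswith Pattern' on [f, n)
  have hiff2 : ∀ j : Nat, f ≤ (j : Int) → (j : Int) < (t.length : Int) →
      (PySem.Chars.startswith (pvSuffix t sa j) p = true ↔ j < l) := by
    intro j hfj hjn
    have hfj' : f ≤ j := by exact_mod_cast hfj
    have hjn' : j < t.length := by exact_mod_cast hjn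
    constructor
    · intro hsw
      by_contra hx
      have hln' : l < t.length := by omega
      have hnotlt : ¬ pvSuffix t sa l < p := fun hc => absurd ((hiff1 l hln').mp hc) (by omega)
      exact hstop2 hln' ((PySem.Chars.startswith_iff _ _).mpr
        (pvPrefix_of_between p (pvSuffix t sa l) (pvSuffix t sa j)
          (not_lt.mp hnotlt)
          (pvSorted_le t sa hsorted (by omega) hjn')
          ((PySem.Chars.startswith_iff _ _).mp hsw)))
    · intro hjl
      exact hall2 j hfj' hjl
  have hA1 : pvLoopA1 t p sa 0 (t.length : Int) = some (f : Int) :=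
    pvLoopA1_eq t p sa hlen f 0 (t.length : Int) (le_refl 0) (by exact_mod_cast Nat.zero_le f)
      (by exact_mod_cast hfn) (le_refl _)
      (fun j _ h2 => hiff1 j (by exact_mod_cast h2))
  have hA2 : pvLoopA2 t p sa (f : Int) (t.length : Int) = some (l : Int) :=
    pvLoopA2_eq t p sa hlen l (f : Int) (t.length : Int) (by exact_mod_cast Nat.zero_le f)
      (by exact_mod_cast hfl) (by exact_mod_cast hln) (le_refl _) hiff2
  unfold Spec_MatchOnePatternUsingSuffixArray
  simp only [MatchOnePatternUsingSuffixArray, MatchOnePatternUsingSuffixArray_alt,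
    ← ht, ← hp, hA1, hA2, hf, hl]
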